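-- pv_equiv track=rewrite | github.com/Manicba/Metro-route | Singapore metro.py | extract_station_codes
-- ===== SOURCE A (Python) =====
-- from collections import defaultdict
--
-- def extract_station_codes(stations):
--         all_codes = set()
--         station_map = defaultdict(list)
--
--         for station in stations:
--             codes = station['STN_NO'].split('/')
--             all_codes.update(codes)
--             station_map[station['STN_NAME']].extend(codes)
--
--         return all_codes, station_map
-- ===== SOURCE B (Python) =====
-- from collections import defaultdict
--
-- def extract_station_codes(stations):
--     # Group-by-name via nested scans: collect the distinct names first, then
--     # gather each name's codes with a scan per name; the code set is derived
--     # from the flattened splits, no incremental set/map maintenance.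
--     all_codes = set(code for s in stations for code in s['STN_NO'].split('/'))
--     names = list(dict.fromkeys(s['STN_NAME'] for s in stations))
--     station_map = defaultdict(list)
--     for name in names:
--         station_map[name] = [c for s in stations if s['STN_NAME'] == name
--                              for c in s['STN_NO'].split('/')]
--     return all_codes, station_map
-- ===== Notes on version B (the rewrite author's own statement) =====
-- stated objective: alternative
-- what changed: B replaces A's single pass that maintains the set and the defaultdict together with a group-by algorithm: it dedupes the station names first, builds each map entry with its own scan over stations, and derives all_codes from the flattened splits.
import Mathlib
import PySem

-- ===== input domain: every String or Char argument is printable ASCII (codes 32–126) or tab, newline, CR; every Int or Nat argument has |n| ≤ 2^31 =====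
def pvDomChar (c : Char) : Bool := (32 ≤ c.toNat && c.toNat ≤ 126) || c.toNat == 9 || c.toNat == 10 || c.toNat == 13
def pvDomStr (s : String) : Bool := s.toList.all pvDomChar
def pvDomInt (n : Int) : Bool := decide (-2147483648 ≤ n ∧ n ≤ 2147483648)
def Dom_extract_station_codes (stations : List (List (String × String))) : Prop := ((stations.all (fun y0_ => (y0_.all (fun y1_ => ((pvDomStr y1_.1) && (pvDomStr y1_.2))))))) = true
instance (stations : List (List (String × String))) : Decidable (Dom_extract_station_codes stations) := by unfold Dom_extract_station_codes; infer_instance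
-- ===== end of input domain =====

-- B replaces A's single accumulating pass with a group-by: dedupe the names, gather each name's codes by its own scan, derive the code set from the flattened splits (alternative decomposition, not claimed faster).

-- ===== PORT A =====
def extract_station_codes (stations : List (List (String × String))) : List String × (List (String × List String)) :=
  let res := stations.foldl
    (fun (st : PySem.Set String × PySem.Dict String (List String)) station =>
      let d := PySem.Dict.mk station
      let codes := ((PySem.Str.split? (d.getD "STN_NO" "") "/").getD [])
      (PySem.Set.update st.1 codes,
       st.2.modify (d.getD "STN_NAME" "") [] (· ++ codes)))
    (PySem.Set.empty, PySem.Dict.empty)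
  (res.1, res.2.items)

-- ===== PORT B =====
def extract_station_codes_alt (stations : List (List (String × String))) : List String × (List (String × List String)) :=
  let all_codes : PySem.Set String :=
    PySem.Set.ofList (stations.flatMap (fun s => ((PySem.Str.split? ((PySem.Dict.mk s).getD "STN_NO" "") "/").getD [])))
  let names := PySem.List.dedup (stations.map (fun s => (PySem.Dict.mk s).getD "STN_NAME" ""))
  let station_map := names.foldl
    (fun (d : PySem.Dict String (List String)) name =>
      d.insert name ((stations.filter (fun s => (PySem.Dict.mk s).getD "STN_NAME" "" == name)).flatMap
        (fun s => ((PySem.Str.split? ((PySem.Dict.mk s).getD "STN_NO" "") "/").getD []))))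
    PySem.Dict.empty
  (all_codes, station_map.items)

-- ===== PRECONDITION & SPEC =====
-- Pre_ excludes stations missing the 'STN_NO' or 'STN_NAME' key, on which A raises KeyError (B raises there too).
def Pre_extract_station_codes (stations : List (List (String × String))) : Prop :=
  (stations.all (fun station => (PySem.Dict.mk station).contains "STN_NO" && (PySem.Dict.mk station).contains "STN_NAME")) = true
instance (stations : List (List (String × String))) : Decidable (Pre_extract_station_codes stations) := by unfold Pre_extract_station_codes; infer_instance

def pvWitness_extract_station_codes : (List (List (String × String))) :=
  [[("STN_NO", "NS1/EW24"), ("STN_NAME", "JURONG EAST")], [("STN_NO", "NS1"), ("STN_NAME", "X")]]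

def Spec_extract_station_codes (stations : List (List (String × String))) (out : List String × (List (String × List String))) : Prop := out = extract_station_codes_alt stations
instance (stations : List (List (String × String))) (out : List String × (List (String × List String))) : Decidable (Spec_extract_station_codes stations out) := by unfold Spec_extract_station_codes; infer_instance

-- ===== CLAIM =====
def Claim_equal_extract_station_codes : Prop := ∀ (stations : List (List (String × String))), Dom_extract_station_codes stations → Pre_extract_station_codes stations → Spec_extract_station_codes stations (extract_station_codes stations)

-- ===== LEMMAS AND PROOFS =====

-- Proof-only abbreviations for the two per-station expressions both ports share.
def pvName (s : List (String × String)) : String := (PySem.Dict.mk s).getD "STN_NAME" ""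
def pvCodes (s : List (String × String)) : List String :=
  ((PySem.Str.split? ((PySem.Dict.mk s).getD "STN_NO" "") "/").getD [])

-- A's incremental set updates equal one ofList of the flattened split lists.
theorem foldl_update_eq_ofList_flatMap {α β : Type} [BEq α] [LawfulBEq α]
    (f : β → List α) (l : List β) (s : PySem.Set α) :
    l.foldl (fun s x => PySem.Set.update s (f x)) s
      = PySem.Set.update s (l.flatMap f) := by
  induction l generalizing s with
  | nil => simp [PySem.Set.update]
  | cons x xs ih => simp [ih, PySem.Set.update_append]

-- A's modify-extend loop, looked up at a key: the concatenation of the codes of the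
-- stations carrying that name (generalisation of getD_foldl_modify_append to list extends).
theorem getD_foldl_modify_extend {α κ : Type} [BEq κ] [LawfulBEq κ]
    (key : α → κ) (g : α → List String) (l : List α) (d : PySem.Dict κ (List String)) (c : κ) :
    (l.foldl (fun d x => d.modify (key x) [] (· ++ g x)) d).getD c []
      = d.getD c [] ++ (l.filter (fun x => key x == c)).flatMap g := by
  induction l generalizing d with
  | nil => simp
  | cons x xs ih =>
    simp only [List.foldl_cons, List.filter_cons]
    rw [ih]
    by_cases h : key x = c
    · simp [h, PySem.Dict.getD_modify_self]
    · simp [h, PySem.Dict.getD_modify_of_ne _ [] _ (Ne.symm h)]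

-- A's single accumulating dict pass has the same items as B's per-name group-by loop.
theorem dict_side (stations : List (List (String × String))) :
    (stations.foldl
        (fun (d : PySem.Dict String (List String)) x => d.modify (pvName x) [] (· ++ pvCodes x))
        PySem.Dict.empty).items
      = ((PySem.List.dedup (stations.map pvName)).foldl
          (fun (d : PySem.Dict String (List String)) name =>
            d.insert name ((stations.filter (fun s => pvName s == name)).flatMap pvCodes))
          PySem.Dict.empty).items := by
  have hnodupA := PySem.Dict.nodup_keys_foldl_modify_key
    (l := stations) (key := pvName) (d0 := ([] : List String))
    (f := fun (_ : PySem.Dict String (List String)) x => (· ++ pvCodes x))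
    (d := PySem.Dict.empty) PySem.Dict.nodup_keys_empty
  rw [PySem.Dict.items_eq_map_keys _ hnodupA ([] : List String)]
  rw [PySem.Dict.keys_foldl_modify_key
    (l := stations) (key := pvName) (d0 := ([] : List String))
    (f := fun (_ : PySem.Dict String (List String)) x => (· ++ pvCodes x))
    (d := PySem.Dict.empty)]
  rw [PySem.Dict.items_foldl_insert_fresh
    (l := PySem.List.dedup (stations.map pvName)) (k := fun n => n)
    (v := fun name => ((stations.filter (fun s => pvName s == name)).flatMap pvCodes))
    (d := PySem.Dict.empty)
    (by intro a _; exact PySem.Dict.contains_empty a)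
    (by simp)]
  have hkeys : PySem.Set.update (PySem.Dict.empty (κ := String) (ν := List String)).keys
      (stations.map pvName) = PySem.List.dedup (stations.map pvName) := by
    simp [PySem.List.dedup_eq_ofList]; rfl
  rw [hkeys]
  have hempty : (PySem.Dict.empty (κ := String) (ν := List String)).items = [] := rfl
  rw [hempty, List.nil_append]
  refine List.map_congr_left ?_
  intro n _
  rw [getD_foldl_modify_extend pvName pvCodes]
  simp

theorem extract_station_codes_eq (stations : List (List (String × String))) :
    extract_station_codes stations = extract_station_codes_alt stations := by
  show ((stations.foldl
      (fun (st : PySem.Set String × PySem.Dict String (List String)) station =>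
        (PySem.Set.update st.1 (pvCodes station),
         st.2.modify (pvName station) [] (· ++ pvCodes station)))
      (PySem.Set.empty, PySem.Dict.empty)).1,
    (stations.foldl
      (fun (st : PySem.Set String × PySem.Dict String (List String)) station =>
        (PySem.Set.update st.1 (pvCodes station),
         st.2.modify (pvName station) [] (· ++ pvCodes station)))
      (PySem.Set.empty, PySem.Dict.empty)).2.items)
    = (PySem.Set.ofList (stations.flatMap pvCodes),
       ((PySem.List.dedup (stations.map pvName)).foldl
          (fun (d : PySem.Dict String (List String)) name =>
            d.insert name ((stations.filter (fun s => pvName s == name)).flatMap pvCodes))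
          PySem.Dict.empty).items)
  rw [PySem.List.foldl_prod_mk
    (f := fun s station => PySem.Set.update s (pvCodes station))
    (g := fun (d : PySem.Dict String (List String)) station =>
      d.modify (pvName station) [] (· ++ pvCodes station))]
  exact Prod.ext
    (by rw [foldl_update_eq_ofList_flatMap pvCodes]; rfl)
    (dict_side stations)

-- ===== VERDICT =====
theorem extract_station_codes_spec : Claim_equal_extract_station_codes := by
  intro stations _ _
  exact extract_station_codes_eq stations
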